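-- pv_equiv track=rewrite | github.com/taiwanfifi/CarbonStack | main.py | merge_pragmas
-- ===== SOURCE A (Python) =====
-- def merge_pragmas(original, llm_output):
--     """Post-process merge: only replace pragma lines. 100% code safety."""
--     if not llm_output:
--         return original
--     orig_lines = original.split("\n")
--     llm_pragmas = [l.strip() for l in llm_output.split("\n") if "#pragma HLS" in l]
--     pragma_pos = [i for i, l in enumerate(orig_lines) if "#pragma HLS" in l]
--     merged = orig_lines.copy()
--     for idx, pos in enumerate(pragma_pos):
--         if idx < len(llm_pragmas):
--             indent = len(orig_lines[pos]) - len(orig_lines[pos].lstrip())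
--             merged[pos] = " " * indent + llm_pragmas[idx]
--     # If original has no pragmas but LLM suggests some, insert before for-loops
--     if not pragma_pos and llm_pragmas:
--         new_merged = []
--         pi = 0
--         for line in merged:
--             stripped = line.lstrip()
--             if pi < len(llm_pragmas) and (stripped.startswith("for") or stripped.startswith("for(")):
--                 indent = len(line) - len(stripped)
--                 new_merged.append(" " * indent + llm_pragmas[pi])
--                 pi += 1
--             new_merged.append(line)
--         merged = new_merged
--     return "\n".join(merged)
-- ===== SOURCE B (Python) =====
-- def merge_pragmas(original, llm_output):
--     """Post-process merge: only replace pragma lines. 100% code safety."""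
--     if not llm_output:
--         return original
--     pragmas = [l.strip() for l in llm_output.split("\n") if "#pragma HLS" in l]
--     queue = list(pragmas)
--     out = []
--     for line in original.split("\n"):
--         if queue and "#pragma HLS" in line:
--             pad = " " * (len(line) - len(line.lstrip()))
--             out.append(pad + queue.pop(0))
--         else:
--             out.append(line)
--     # queue untouched <=> original had no pragma line: insert before for-loops
--     if pragmas and len(queue) == len(pragmas):
--         ins = []
--         for line in out:
--             if queue and line.lstrip().startswith("for"):
--                 pad = " " * (len(line) - len(line.lstrip()))
--                 ins.append(pad + queue.pop(0))
--             ins.append(line)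
--         out = ins
--     return "\n".join(out)
-- ===== Notes on version B (the rewrite author's own statement) =====
-- stated objective: simpler
-- what changed: B replaces A's two-phase index machinery (enumerate pragma positions, then set merged[pos] by index, then re-detect emptiness of the position list) by treating the LLM pragmas as a queue consumed head-first during a single scan of the lines; 'queue still full' detects the no-pragma-in-original case, so there is no position index, no counter and no seen flag, and the fallback insertion consumes the same queue.
import Mathlib
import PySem

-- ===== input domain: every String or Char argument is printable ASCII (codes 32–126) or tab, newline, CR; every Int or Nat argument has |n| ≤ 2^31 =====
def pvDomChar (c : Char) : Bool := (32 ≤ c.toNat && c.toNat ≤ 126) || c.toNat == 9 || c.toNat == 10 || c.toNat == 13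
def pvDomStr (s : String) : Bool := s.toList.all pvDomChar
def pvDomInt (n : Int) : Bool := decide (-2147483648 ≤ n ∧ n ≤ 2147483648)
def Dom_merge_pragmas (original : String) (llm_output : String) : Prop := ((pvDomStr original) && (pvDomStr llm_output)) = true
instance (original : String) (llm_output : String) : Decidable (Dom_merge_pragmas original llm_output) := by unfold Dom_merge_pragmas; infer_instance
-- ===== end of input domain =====

-- B treats the LLM pragmas as a queue consumed head-first while scanning the lines once
-- (no precomputed position index, no counter, no seen flag: "queue still full" detects
-- the no-pragma case); same return value, objective: simpler decomposition.

-- ===== PORT A =====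

-- s.split("\n"): sep = "\n" ≠ "", so split? is always `some`; the default is never used
def pvSplitNl (s : String) : List String := (PySem.Str.split? s "\n").getD []

-- " " * indent + p  with  indent = len(line) - len(line.lstrip())
def pvRepl (line p : String) : String :=
  String.ofList (PySem.List.pyRepeat [' '] (PySem.Str.len line - PySem.Str.len (PySem.Str.lstrip line))) ++ p

-- one step of A's fallback insertion loop over `merged` (state: new_merged, pi)
def pvInsStepA (prs : List String) (s : List String × Int) (line : String) : List String × Int :=
  let stripped := PySem.Str.lstrip line
  if s.2 < (prs.length : Int) &&
      (PySem.Str.startswith stripped "for" || PySem.Str.startswith stripped "for(") then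
    (s.1 ++ [pvRepl line (PySem.List.pyGetD prs s.2 "")] ++ [line], s.2 + 1)
  else
    (s.1 ++ [line], s.2)

def merge_pragmas (original : String) (llm_output : String) : String :=
  if llm_output = "" then original
  else
    let orig_lines := pvSplitNl original
    let llm_pragmas := ((pvSplitNl llm_output).filter (fun l => PySem.Str.isIn "#pragma HLS" l)).map PySem.Str.strip
    let pragma_pos : List Int :=
      ((PySem.List.enumerate orig_lines 0).filter (fun p => PySem.Str.isIn "#pragma HLS" p.2)).map (·.1)
    -- for idx, pos in enumerate(pragma_pos): merged[pos] = …  (pos from enumerate: 0 ≤ pos < len(orig_lines), so List.set at pos.toNat is the exact Python list assignment)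
    let merged :=
      (PySem.List.enumerate pragma_pos 0).foldl
        (fun m q =>
          if q.1 < (llm_pragmas.length : Int) then
            m.set q.2.toNat (pvRepl (PySem.List.pyGetD orig_lines q.2 "") (PySem.List.pyGetD llm_pragmas q.1 ""))
          else m)
        orig_lines
    let merged :=
      if pragma_pos = [] ∧ llm_pragmas ≠ [] then (merged.foldl (pvInsStepA llm_pragmas) ([], 0)).1
      else merged
    PySem.Str.join "\n" merged

-- ===== PORT B =====

-- pad = " " * (len(line) - len(line.lstrip()))
def pvPad (line : String) : String :=
  String.ofList (PySem.List.pyRepeat [' '] (PySem.Str.len line - PySem.Str.len (PySem.Str.lstrip line)))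

-- B's single pass: recursion on the lines with the pragma queue as state;
-- returns (out, queue left over)
def pvReplaceB : List String → List String → List String × List String
  | [], q => ([], q)
  | line :: rest, q =>
    match q with
    | p :: q' =>
      if PySem.Str.isIn "#pragma HLS" line then
        let r := pvReplaceB rest q'
        ((pvPad line ++ p) :: r.1, r.2)
      else
        let r := pvReplaceB rest (p :: q')
        (line :: r.1, r.2)
    | [] =>
      let r := pvReplaceB rest []
      (line :: r.1, r.2)

-- B's fallback insertion: recursion on the lines, again consuming the queue head-first
def pvInsertB : List String → List String → List String
  | [], _ => []
  | line :: rest, q =>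
    match q with
    | p :: q' =>
      if PySem.Str.startswith (PySem.Str.lstrip line) "for" then
        (pvPad line ++ p) :: line :: pvInsertB rest q'
      else
        line :: pvInsertB rest (p :: q')
    | [] => line :: pvInsertB rest []

def merge_pragmas_alt (original : String) (llm_output : String) : String :=
  if llm_output = "" then original
  else
    let pragmas := ((pvSplitNl llm_output).filter (fun l => PySem.Str.isIn "#pragma HLS" l)).map PySem.Str.strip
    let r := pvReplaceB (pvSplitNl original) pragmas
    let out :=
      if pragmas ≠ [] ∧ r.2.length = pragmas.length then pvInsertB r.1 pragmas
      else r.1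
    PySem.Str.join "\n" out

-- ===== PRECONDITION & SPEC =====
def Spec_merge_pragmas (original : String) (llm_output : String) (out : String) : Prop := out = merge_pragmas_alt original llm_output
instance (original : String) (llm_output : String) (out : String) : Decidable (Spec_merge_pragmas original llm_output out) := by unfold Spec_merge_pragmas; infer_instance

-- ===== CLAIM (what is proved, stated in full; the proofs are below) =====
def Claim_equal_merge_pragmas : Prop := ∀ (original : String) (llm_output : String), Dom_merge_pragmas original llm_output → Spec_merge_pragmas original llm_output (merge_pragmas original llm_output)

-- ===== LEMMAS AND PROOFS =====

-- abbreviation used only by the proofs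
def pvP (l : String) : Bool := PySem.Str.isIn "#pragma HLS" l

-- A's replacement phase as a map with an index counter (proof-only intermediate)
def pvAmap (prs : List String) : List String → Int → List String
  | [], _ => []
  | l :: rest, r =>
    (if pvP l then (if r < (prs.length : Int) then pvRepl l (PySem.List.pyGetD prs r "") else l) else l)
      :: pvAmap prs rest (if pvP l then r + 1 else r)

theorem pvRepl_eq_pad (l p : String) : pvRepl l p = pvPad l ++ p := rfl

-- a set at the split point of an append
theorem pv_set_append (q : List String) (l v : String) (rest : List String) :
    (q ++ l :: rest).set q.length v = q ++ v :: rest := by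
  induction q with
  | nil => rfl
  | cons a q ih => simpa [List.set] using ih

-- A's fold of in-place sets over enumerate(pragma_pos) is the map-with-counter pvAmap
theorem pvA_fold (prs L : List String) :
    ∀ (ls q : List String) (s : Nat) (r : Int), L.drop s = ls → q.length = s →
    ((PySem.List.enumerate
        (((PySem.List.enumerate ls (s : Int)).filter (fun p => PySem.Str.isIn "#pragma HLS" p.2)).map (·.1)) r).foldl
      (fun m p =>
        if p.1 < (prs.length : Int) then
          m.set p.2.toNat (pvRepl (PySem.List.pyGetD L p.2 "") (PySem.List.pyGetD prs p.1 ""))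
        else m)
      (q ++ ls))
    = q ++ pvAmap prs ls r := by
  intro ls
  induction ls with
  | nil =>
    intro q s r _ _
    simp [PySem.List.enumerate_nil, pvAmap]
  | cons l rest ih =>
    intro q s r hL hq
    have hget : PySem.List.pyGetD L (s : Int) "" = l := by
      rw [PySem.List.pyGetD_natCast]
      have h0 : (L.drop s)[0]? = some l := by rw [hL]; rfl
      rw [List.getElem?_drop] at h0
      simp only [Nat.add_zero] at h0
      simp [List.getD, h0]
    have hcast : ((s : Int) + 1) = ((s + 1 : Nat) : Int) := by push_cast; ring
    have hrest : L.drop (s + 1) = rest := by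
      have h1 := congrArg (List.drop 1) hL
      simpa [List.drop_drop, Nat.add_comm] using h1
    rw [PySem.List.enumerate_cons, List.filter_cons]
    cases hp : PySem.Str.isIn "#pragma HLS" l
    · simp only [Bool.false_eq_true, if_false]
      rw [hcast]
      have hsplit : q ++ l :: rest = (q ++ [l]) ++ rest := by simp
      rw [hsplit, ih (q ++ [l]) (s + 1) r hrest (by simp [hq])]
      simp only [pvAmap, pvP, hp, Bool.false_eq_true, if_false, List.append_assoc,
        List.cons_append, List.nil_append]
    · simp only [if_true, List.map_cons, PySem.List.enumerate_cons, List.foldl_cons]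
      by_cases hr : r < (prs.length : Int)
      · rw [if_pos hr, hget]
        have hs : ((s : Int)).toNat = s := by omega
        have hset : (q ++ l :: rest).set ((s : Int)).toNat
            (pvRepl l (PySem.List.pyGetD prs r "")) = q ++ pvRepl l (PySem.List.pyGetD prs r "") :: rest := by
          rw [hs, ← hq]; exact pv_set_append q l _ rest
        have hsplit : q ++ pvRepl l (PySem.List.pyGetD prs r "") :: rest
            = (q ++ [pvRepl l (PySem.List.pyGetD prs r "")]) ++ rest := by simp
        rw [hset, hcast, hsplit,
          ih (q ++ [pvRepl l (PySem.List.pyGetD prs r "")]) (s + 1) (r + 1) hrest (by simp [hq])]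
        simp only [pvAmap, pvP, hp, hr, if_true, List.append_assoc, List.cons_append,
          List.nil_append]
      · rw [if_neg hr, hcast]
        have hsplit : q ++ l :: rest = (q ++ [l]) ++ rest := by simp
        rw [hsplit, ih (q ++ [l]) (s + 1) (r + 1) hrest (by simp [hq])]
        simp only [pvAmap, pvP, hp, hr, if_true, if_false, List.append_assoc,
          List.cons_append, List.nil_append]

-- indexing by the counter = taking the head of the dropped suffix
theorem pv_drop_head (prs : List String) (n : Nat) (p : String) (q' : List String)
    (h : prs.drop n = p :: q') :
    PySem.List.pyGetD prs (n : Int) "" = p ∧ (n : Int) < (prs.length : Int) ∧ prs.drop (n + 1) = q' := by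
  have h0 : prs[n]? = some p := by
    have := congrArg (fun l => l[0]?) h
    simpa [List.getElem?_drop] using this
  have hlt : n < prs.length := by
    by_contra hc
    rw [List.getElem?_eq_none (by omega)] at h0
    simp at h0
  refine ⟨?_, by exact_mod_cast hlt, ?_⟩
  · rw [PySem.List.pyGetD_natCast]; simp [List.getD, h0]
  · have := congrArg (List.drop 1) h
    simpa [List.drop_drop, Nat.add_comm] using this

theorem pv_drop_nil (prs : List String) (n : Nat) (h : prs.drop n = []) :
    ¬ (n : Int) < (prs.length : Int) := by
  have := List.drop_eq_nil_iff.mp h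
  omega

-- the counter map IS the queue-consuming pass (first component)
theorem pvAmap_eq_replace (prs : List String) :
    ∀ (ls : List String) (n : Nat), pvAmap prs ls (n : Int) = (pvReplaceB ls (prs.drop n)).1 := by
  intro ls
  induction ls with
  | nil => intro n; rfl
  | cons l rest ih =>
    intro n
    cases hd : prs.drop n with
    | cons p q' =>
      obtain ⟨hget, hlt, hdrop⟩ := pv_drop_head prs n p q' hd
      simp only [pvAmap, pvReplaceB, hd]
      cases hp : pvP l
      · have hp' : PySem.Str.isIn "#pragma HLS" l = false := hp
        simp only [hp, hp', Bool.false_eq_true, if_false]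
        rw [← hd, ih n]
      · have hp' : PySem.Str.isIn "#pragma HLS" l = true := hp
        simp only [hp, hp', if_true, if_pos hlt, hget, pvRepl_eq_pad]
        have : (n : Int) + 1 = ((n + 1 : Nat) : Int) := by push_cast; ring
        rw [this, ih (n + 1), hdrop]
    | nil =>
      have hlt := pv_drop_nil prs n hd
      simp only [pvAmap, pvReplaceB, hd, if_neg hlt, ite_self]
      cases hp : pvP l
      · simp only [hp, Bool.false_eq_true, if_false]
        rw [← hd, ih n, hd]
      · simp only [hp, if_true]
        have : (n : Int) + 1 = ((n + 1 : Nat) : Int) := by push_cast; ring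
        have hdrop1 : prs.drop (n + 1) = [] := by
          have := List.drop_eq_nil_iff.mp hd
          exact List.drop_eq_nil_iff.mpr (by omega)
        rw [this, ih (n + 1), hdrop1]

-- if no line contains a pragma, the pass changes nothing and consumes nothing
theorem pvReplaceB_no_pragma (ls : List String) (hnp : ls.any pvP = false) :
    ∀ q, pvReplaceB ls q = (ls, q) := by
  induction ls with
  | nil => intro q; rfl
  | cons l rest ih =>
    intro q
    simp only [List.any_cons, Bool.or_eq_false_iff] at hnp
    have hp : PySem.Str.isIn "#pragma HLS" l = false := hnp.1
    cases q with
    | nil => simp only [pvReplaceB, ih hnp.2]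
    | cons p q' => simp only [pvReplaceB, hp, Bool.false_eq_true, if_false, ih hnp.2]

theorem pvReplaceB_snd_le (ls : List String) :
    ∀ q, ((pvReplaceB ls q).2).length ≤ q.length := by
  induction ls with
  | nil => intro q; simp [pvReplaceB]
  | cons l rest ih =>
    intro q
    cases q with
    | nil => simpa [pvReplaceB] using ih []
    | cons p q' =>
      simp only [pvReplaceB]
      cases hp : PySem.Str.isIn "#pragma HLS" l
      · simpa [hp] using ih (p :: q')
      · simp only [hp, if_true]
        exact le_trans (ih q') (by simp)

-- a nonempty queue shrinks as soon as some line contains a pragma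
theorem pvReplaceB_consumed (ls : List String) :
    ∀ q, q ≠ [] → ls.any pvP = true → ((pvReplaceB ls q).2).length < q.length := by
  induction ls with
  | nil => intro q _ h; simp at h
  | cons l rest ih =>
    intro q hq hany
    cases q with
    | nil => exact absurd rfl hq
    | cons p q' =>
      simp only [pvReplaceB]
      cases hp : PySem.Str.isIn "#pragma HLS" l
      · have hrest : rest.any pvP = true := by
          simp only [List.any_cons] at hany
          rw [show pvP l = false from hp, Bool.false_or] at hany
          exact hany
        simpa [hp] using ih (p :: q') (by simp) hrest
      · simp only [hp, if_true]
        exact lt_of_le_of_lt (pvReplaceB_snd_le rest q') (by simp)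

-- pragma_pos is empty iff no line contains a pragma
theorem pv_pos_empty (ls : List String) :
    ∀ s : Int,
    ((((PySem.List.enumerate ls s).filter (fun p => PySem.Str.isIn "#pragma HLS" p.2)).map (·.1)) = [])
      ↔ ls.any pvP = false := by
  induction ls with
  | nil => intro s; simp [PySem.List.enumerate_nil]
  | cons l rest ih =>
    intro s
    rw [PySem.List.enumerate_cons, List.filter_cons]
    cases hp : PySem.Str.isIn "#pragma HLS" l
    · have hp2 : pvP l = false := hp
      simp only [hp, Bool.false_eq_true, if_false]
      rw [ih (s + 1)]
      simp [hp2]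
    · have hp2 : pvP l = true := hp
      simp [hp, hp2]

-- startswith("for(") is subsumed by startswith("for")
theorem pv_for_or (line : String) :
    (PySem.Str.startswith (PySem.Str.lstrip line) "for"
        || PySem.Str.startswith (PySem.Str.lstrip line) "for(")
      = PySem.Str.startswith (PySem.Str.lstrip line) "for" := by
  have himp : PySem.Str.startswith (PySem.Str.lstrip line) "for(" = true →
      PySem.Str.startswith (PySem.Str.lstrip line) "for" = true := by
    intro h
    rw [PySem.Str.startswith_eq] at h ⊢
    rw [PySem.Chars.startswith_iff] at h ⊢
    exact List.IsPrefix.trans ⟨['('], rfl⟩ h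
  cases h1 : PySem.Str.startswith (PySem.Str.lstrip line) "for"
  · cases h2 : PySem.Str.startswith (PySem.Str.lstrip line) "for("
    · rfl
    · exact absurd (himp h2) (by rw [h1]; exact Bool.false_ne_true)
  · rfl

-- A's fallback fold with its index counter = B's queue-consuming insertion
theorem pvIns_fold (prs : List String) :
    ∀ (ls acc : List String) (n : Nat),
    ((ls.foldl (pvInsStepA prs) (acc, (n : Int)))).1 = acc ++ pvInsertB ls (prs.drop n) := by
  intro ls
  induction ls with
  | nil => intro acc n; simp [pvInsertB]
  | cons line rest ih =>
    intro acc n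
    simp only [List.foldl_cons, pvInsStepA, pv_for_or]
    cases hd : prs.drop n with
    | cons p q' =>
      obtain ⟨hget, hlt, hdrop⟩ := pv_drop_head prs n p q' hd
      simp only [pvInsertB]
      cases hf : PySem.Str.startswith (PySem.Str.lstrip line) "for"
      · simp only [hf, Bool.and_false, Bool.false_eq_true, if_false]
        have h1 := ih (acc ++ [line]) n
        rw [hd] at h1
        rw [h1]; simp
      · simp only [hf, Bool.and_true, if_pos (decide_eq_true hlt), hget, pvRepl_eq_pad]
        have hc : (n : Int) + 1 = ((n + 1 : Nat) : Int) := by push_cast; ring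
        have h1 := ih (acc ++ [pvPad line ++ p] ++ [line]) (n + 1)
        rw [hdrop] at h1
        rw [hc, h1]; simp
    | nil =>
      have hlt := pv_drop_nil prs n hd
      have hdec : (decide ((n : Int) < (prs.length : Int)) = false) := decide_eq_false hlt
      simp only [pvInsertB, hdec, Bool.false_and, Bool.false_eq_true, if_false]
      have h1 := ih (acc ++ [line]) n
      rw [hd] at h1
      rw [h1]; simp

-- ===== VERDICT (by name: the statement is the Claim_ definition above) =====
theorem merge_pragmas_spec : Claim_equal_merge_pragmas := by
  intro original llm_output _
  unfold Spec_merge_pragmas merge_pragmas merge_pragmas_alt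
  by_cases h0 : llm_output = ""
  · simp [h0]
  · simp only [h0, if_false]
    set lines := pvSplitNl original with hlines
    set prs := ((pvSplitNl llm_output).filter (fun l => PySem.Str.isIn "#pragma HLS" l)).map PySem.Str.strip with hprs
    have hA := pvA_fold prs lines lines [] 0 0 rfl rfl
    simp only [List.nil_append, Nat.cast_zero] at hA
    rw [hA]
    have hmap : pvAmap prs lines 0 = (pvReplaceB lines prs).1 := by
      have := pvAmap_eq_replace prs lines 0
      simpa using this
    have hiff := pv_pos_empty lines 0
    by_cases hany : lines.any pvP = false
    · -- no pragma line in the original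
      have hrep := pvReplaceB_no_pragma lines hany prs
      have hpos : ((((PySem.List.enumerate lines 0).filter (fun p => PySem.Str.isIn "#pragma HLS" p.2)).map (·.1)) = []) := hiff.mpr hany
      have hlines0 : pvAmap prs lines 0 = lines := by rw [hmap, hrep]
      by_cases hne : prs = []
      · rw [if_neg (by simp [hne]), if_neg (by simp [hne]), hmap]
      · rw [if_pos ⟨hpos, hne⟩, if_pos ⟨hne, by rw [hrep]⟩, hlines0]
        have hins := pvIns_fold prs lines [] 0
        simp only [Nat.cast_zero, List.drop_zero, List.nil_append] at hins
        rw [hins, hrep]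
    · -- some line contains a pragma: neither fallback fires
      have hany' : lines.any pvP = true := by
        cases h : lines.any pvP
        · exact absurd h hany
        · rfl
      rw [if_neg (fun h => hany (hiff.mp h.1)), if_neg ?_, hmap]
      rintro ⟨hne, hlen⟩
      exact absurd hlen (Nat.ne_of_lt (pvReplaceB_consumed lines prs hne hany'))
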